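-- pv_equiv track=rewrite | github.com/AidanFeess/smallprojects | Codewars/codewars esolang interpreter 1.py | my_first_interpreter
-- ===== SOURCE A (Python) =====
-- def my_first_interpreter(code):
--     output = ''
--     x = code.split('.')
--     mem = 0
--     for y in x:
--         for char in y:
--             if char == '+':
--                 mem+=1
--                 if mem > 255:
--                     mem=0
--         output += chr(mem)
--     return output[0:-1]
-- ===== SOURCE B (Python) =====
-- def my_first_interpreter(code):
--     mem = 0
--     output = ''
--     for char in code:
--         if char == '+':
--             mem += 1
--             if mem > 255:
--                 mem = 0
--         elif char == '.':
--             output += chr(mem)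
--     return output
-- ===== Notes on version B (the rewrite author's own statement) =====
-- stated objective: simpler
-- what changed: Single pass over the raw string, emitting chr(mem) at each dot character, instead of splitting on the dot separator, folding each segment, appending one char per segment and dropping the last.
import Mathlib
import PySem

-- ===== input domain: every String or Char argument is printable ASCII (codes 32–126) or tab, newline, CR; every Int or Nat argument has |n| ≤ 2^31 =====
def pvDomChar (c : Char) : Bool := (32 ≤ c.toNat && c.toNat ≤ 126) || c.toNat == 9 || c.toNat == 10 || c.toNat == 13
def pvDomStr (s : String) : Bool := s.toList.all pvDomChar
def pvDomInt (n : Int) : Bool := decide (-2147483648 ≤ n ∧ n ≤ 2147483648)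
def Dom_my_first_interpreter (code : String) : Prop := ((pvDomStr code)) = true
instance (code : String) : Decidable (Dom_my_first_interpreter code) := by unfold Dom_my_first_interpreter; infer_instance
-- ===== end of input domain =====

-- B replaces A's split-on-dot-then-fold-each-segment-and-drop-last scheme by a single pass over
-- the raw string that emits chr(mem) at each dot (objective: simpler).


-- ===== PORT A =====
-- mem += 1; if mem > 255: mem = 0   (shared by both ports: it is the same two Python lines)
def pvBump (mem : Int) : Int := if mem + 1 > 255 then 0 else mem + 1

-- inner 'for char in y' body of A
def pvStepA (mem : Int) (ch : Char) : Int := if ch = '+' then pvBump mem else mem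

def my_first_interpreter (code : String) : String :=
  let x := PySem.Chars.splitOn code.toList ['.']
  let st := x.foldl (fun (st : List Char × Int) y =>
      let mem := y.foldl pvStepA st.2
      (st.1 ++ [Char.ofNat mem.toNat], mem)) ([], 0)
  String.ofList (PySem.List.slice st.1 (some 0) (some (-1)))

-- ===== PORT B =====
def my_first_interpreter_alt (code : String) : String :=
  let st := code.toList.foldl (fun (st : Int × List Char) ch =>
      if ch = '+' then (pvBump st.1, st.2)
      else if ch = '.' then (st.1, st.2 ++ [Char.ofNat st.1.toNat])
      else st) (0, [])
  String.ofList st.2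

-- ===== PRECONDITION & SPEC =====
def Spec_my_first_interpreter (code : String) (out : String) : Prop := out = my_first_interpreter_alt code
instance (code : String) (out : String) : Decidable (Spec_my_first_interpreter code out) := by unfold Spec_my_first_interpreter; infer_instance

-- ===== CLAIM (what is proved, stated in full; the proofs are below) =====
def Claim_equal_my_first_interpreter : Prop := ∀ (code : String), Dom_my_first_interpreter code → Spec_my_first_interpreter code (my_first_interpreter code)

-- ===== LEMMAS AND PROOFS =====

-- structural form of code.split('.') for the one-char separator '.'
def pvSpl : List Char → List (List Char)
  | [] => [[]]
  | c :: r => if c = '.' then [] :: pvSpl r else (pvSpl r).modifyHead (c :: ·)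

theorem pvSpl_ne_nil (l : List Char) : pvSpl l ≠ [] := by
  induction l with
  | nil => simp [pvSpl]
  | cons c r ih =>
    by_cases h : c = '.' <;> simp [pvSpl, h]
    cases hr : pvSpl r with
    | nil => exact absurd hr ih
    | cons a t => simp

theorem pvGo_eq (l : List Char) : ∀ (fuel : Nat) (cur : List Char) (acc : List (List Char)),
    l.length < fuel →
    PySem.Chars.splitOn.go ['.'] fuel l cur acc
      = acc.reverse ++ (pvSpl l).modifyHead (cur.reverse ++ ·) := by
  induction l with
  | nil =>
    intro fuel cur acc h
    cases fuel with
    | zero => omega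
    | succ n => simp [PySem.Chars.splitOn.go, pvSpl, List.modifyHead]
  | cons c r ih =>
    intro fuel cur acc h
    cases fuel with
    | zero => omega
    | succ n =>
      by_cases hc : c = '.'
      · subst hc
        have hpre : List.isPrefixOf ['.'] ('.' :: r) = true := by simp [List.isPrefixOf]
        simp only [PySem.Chars.splitOn.go, hpre, if_pos]
        rw [show List.drop (List.length ['.']) ('.' :: r) = r by simp]
        rw [ih n [] (cur.reverse :: acc) (by simpa using h)]
        simp [pvSpl, List.modifyHead]
        cases hr : pvSpl r with
        | nil => exact absurd hr (pvSpl_ne_nil r)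
        | cons a t => simp
      · have hpre : List.isPrefixOf ['.'] (c :: r) = false := by
          simp [List.isPrefixOf]; exact fun hh => absurd hh.symm hc
        simp only [PySem.Chars.splitOn.go, hpre]
        rw [if_neg (by simp)]
        rw [ih n (c :: cur) acc (by simpa using h)]
        simp only [pvSpl, if_neg hc]
        cases hr : pvSpl r with
        | nil => exact absurd hr (pvSpl_ne_nil r)
        | cons a t => simp

theorem pvSplitOn_eq (l : List Char) : PySem.Chars.splitOn l ['.'] = pvSpl l := by
  unfold PySem.Chars.splitOn
  rw [pvGo_eq l (l.length + 1) [] [] (by omega)]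
  simp only [List.reverse_nil, List.nil_append]
  cases hr : pvSpl l with
  | nil => exact absurd hr (pvSpl_ne_nil l)
  | cons a t => simp

-- A's outer loop, as structural recursion over the segment list
def pvARun : List (List Char) → Int → List Char × Int
  | [], mem => ([], mem)
  | s :: S, mem =>
    let m := s.foldl pvStepA mem
    let r := pvARun S m
    (Char.ofNat m.toNat :: r.1, r.2)

theorem pvAFold (S : List (List Char)) : ∀ (out : List Char) (mem : Int),
    S.foldl (fun (st : List Char × Int) y =>
      (st.1 ++ [Char.ofNat (y.foldl pvStepA st.2).toNat], y.foldl pvStepA st.2)) (out, mem)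
    = (out ++ (pvARun S mem).1, (pvARun S mem).2) := by
  induction S with
  | nil => intro out mem; simp [pvARun]
  | cons s S ih =>
    intro out mem
    simp only [List.foldl_cons, pvARun, ih]
    simp

-- B's loop, as structural recursion over the characters
def pvBRun : List Char → Int → Int × List Char
  | [], mem => (mem, [])
  | c :: cs, mem =>
    if c = '+' then pvBRun cs (pvBump mem)
    else if c = '.' then
      let r := pvBRun cs mem
      (r.1, Char.ofNat mem.toNat :: r.2)
    else pvBRun cs mem

theorem pvBFold (cs : List Char) : ∀ (mem : Int) (out : List Char),
    cs.foldl (fun (st : Int × List Char) ch =>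
      if ch = '+' then (pvBump st.1, st.2)
      else if ch = '.' then (st.1, st.2 ++ [Char.ofNat st.1.toNat])
      else st) (mem, out)
    = ((pvBRun cs mem).1, out ++ (pvBRun cs mem).2) := by
  induction cs with
  | nil => intro mem out; simp [pvBRun]
  | cons c cs ih =>
    intro mem out
    by_cases h1 : c = '+'
    · simp [List.foldl_cons, pvBRun, h1, ih]
    · by_cases h2 : c = '.'
      · simp [List.foldl_cons, pvBRun, h2, ih]
      · simp [List.foldl_cons, pvBRun, h1, h2, ih]

theorem pvARun_fst_ne_nil (S : List (List Char)) (mem : Int) (h : S ≠ []) :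
    (pvARun S mem).1 ≠ [] := by
  cases S with
  | nil => exact absurd rfl h
  | cons s S => simp [pvARun]

-- the heart: A's per-segment emissions with the last dropped = B's per-dot emissions
theorem pvMain (cs : List Char) : ∀ (mem : Int),
    (pvARun (pvSpl cs) mem).1.dropLast = (pvBRun cs mem).2 := by
  induction cs with
  | nil => intro mem; simp [pvSpl, pvARun, pvBRun]
  | cons c r ih =>
    intro mem
    by_cases hc : c = '.'
    · subst hc
      rw [show pvSpl ('.' :: r) = [] :: pvSpl r from by simp [pvSpl]]
      rw [show pvBRun ('.' :: r) mem = ((pvBRun r mem).1, Char.ofNat mem.toNat :: (pvBRun r mem).2)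
            from by simp [pvBRun]]
      rw [show pvARun ([] :: pvSpl r) mem
            = (Char.ofNat mem.toNat :: (pvARun (pvSpl r) mem).1, (pvARun (pvSpl r) mem).2)
            from by simp [pvARun]]
      simp only [List.dropLast_cons_of_ne_nil (pvARun_fst_ne_nil _ _ (pvSpl_ne_nil r))]
      rw [ih mem]
    · cases hr : pvSpl r with
      | nil => exact absurd hr (pvSpl_ne_nil r)
      | cons h t =>
        have key : pvSpl (c :: r) = (c :: h) :: t := by
          simp [pvSpl, if_neg hc, hr, List.modifyHead]
        rw [key]
        have lhs : pvARun ((c :: h) :: t) mem = pvARun (h :: t) (pvStepA mem c) := by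
          simp [pvARun, List.foldl_cons]
        rw [lhs, ← hr]
        by_cases h1 : c = '+'
        · rw [ih (pvStepA mem c)]
          simp [pvBRun, h1, pvStepA]
        · rw [ih (pvStepA mem c)]
          simp [pvBRun, h1, hc, pvStepA]

-- ===== VERDICT (by name: the statement is the Claim_ definition above) =====
theorem my_first_interpreter_spec : Claim_equal_my_first_interpreter := by
  intro code _
  simp only [Spec_my_first_interpreter, my_first_interpreter, my_first_interpreter_alt]
  rw [pvSplitOn_eq, pvAFold, pvBFold]
  simp only [List.nil_append, PySem.List.slice_zero_start, PySem.List.slice_to_neg_one]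
  rw [pvMain]
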